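-- pv_equiv track=rewrite | github.com/grahambrown013/Project-8 | rcv.py | get_votes
-- ===== SOURCE A (Python) =====
-- def get_votes(string):
--     """
--     Args:
--         string: A string containing letters, commas and '\n'
--     Returns:
--         This function will take the parameter 'string' and return a split up string as a list of list of strings.
--
--     """
--     split_list = string.split('\n')
--     result = []
--     temp = []
--     for string in split_list:
--         for index in string:
--             if index != ',':
--                 temp.append(str(index))
--         if len(temp) > 0:
--             result.append(temp)
--         temp = []
--     return result
-- ===== SOURCE B (Python) =====
-- def get_votes(string):
--     # Single fused pass over the characters (state machine), never splitting into lines.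
--     result = []
--     cur = []
--     for ch in string:
--         if ch == '\n':
--             if cur:
--                 result.append(cur)
--                 cur = []
--         elif ch != ',':
--             cur.append(ch)
--     if cur:
--         result.append(cur)
--     return result
-- ===== Notes on version B (the rewrite author's own statement) =====
-- stated objective: alternative
-- what changed: Replaces A's split-into-lines-then-nested-filter-loop with a single fused character-level state machine: one pass over the raw string keeping (result, current line), flushing the current line at each newline and at the end, never calling split.
import Mathlib
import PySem

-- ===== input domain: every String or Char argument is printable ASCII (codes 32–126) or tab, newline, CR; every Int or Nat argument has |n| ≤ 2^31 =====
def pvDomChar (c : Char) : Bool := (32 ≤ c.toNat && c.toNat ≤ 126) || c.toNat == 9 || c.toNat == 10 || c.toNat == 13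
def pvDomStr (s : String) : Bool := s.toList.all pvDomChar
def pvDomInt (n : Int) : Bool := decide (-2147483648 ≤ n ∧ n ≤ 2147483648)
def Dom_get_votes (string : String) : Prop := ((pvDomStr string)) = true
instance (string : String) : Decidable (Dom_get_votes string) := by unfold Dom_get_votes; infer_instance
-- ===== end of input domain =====

-- B replaces A's split-then-nested-loop by a single fused character-level state machine (alternative decomposition; return value only).

-- ===== PORT A =====
def get_votes (string : String) : List (List String) :=
  let split_list : List String := (PySem.Chars.splitOn string.toList ['\n']).map String.ofList
  split_list.foldl
    (fun result line =>
      let temp := line.toList.foldl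
        (fun temp index => if (index != ',') = true then temp ++ [String.singleton index] else temp) []
      if temp.length > 0 then result ++ [temp] else result)
    []

-- ===== PORT B =====
-- the loop body of B's single pass: flush cur at '\n', skip ',', otherwise append the char
def gvStep (st : List (List String) × List String) (ch : Char) : List (List String) × List String :=
  if ch = '\n' then (if st.2 ≠ [] then (st.1 ++ [st.2], []) else st)
  else if ch ≠ ',' then (st.1, st.2 ++ [String.singleton ch])
  else st

def get_votes_alt (string : String) : List (List String) :=
  let st := string.toList.foldl gvStep ([], [])
  if st.2 ≠ [] then st.1 ++ [st.2] else st.1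

-- ===== PRECONDITION & SPEC =====
def Spec_get_votes (string : String) (out : List (List String)) : Prop := out = get_votes_alt string
instance (string : String) (out : List (List String)) : Decidable (Spec_get_votes string out) := by unfold Spec_get_votes; infer_instance

-- ===== CLAIM (what is proved, stated in full; the proofs are below) =====
def Claim_equal_get_votes : Prop := ∀ (string : String), Dom_get_votes string → Spec_get_votes string (get_votes string)

-- ===== LEMMAS AND PROOFS =====

-- structural characterisation of splitting on a single newline
def splitNl : List Char → List (List Char)
  | [] => [[]]
  | c :: t =>
    if c = '\n' then [] :: splitNl t
    else
      match splitNl t with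
      | [] => [[c]]
      | p :: ps => (c :: p) :: ps

theorem splitNl_ne_nil (l : List Char) : splitNl l ≠ [] := by
  cases l with
  | nil => simp [splitNl]
  | cons c t =>
    simp only [splitNl]
    split
    · simp
    · split <;> simp

theorem splitOn_go_nl (fuel : Nat) : ∀ (l cur : List Char) (acc : List (List Char)),
    l.length < fuel →
    PySem.Chars.splitOn.go ['\n'] fuel l cur acc
      = acc.reverse ++ (splitNl l).modifyHead (cur.reverse ++ ·) := by
  induction fuel with
  | zero => intro l cur acc h; omega
  | succ n ih =>
    intro l cur acc h
    cases l with
    | nil =>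
      rw [PySem.Chars.splitOn.go.eq_2 _ _ _ _ (by omega)]
      simp [splitNl]
    | cons c rest =>
      rw [PySem.Chars.splitOn.go.eq_3]
      by_cases hc : c = '\n'
      · subst hc
        rw [if_pos (by simp [List.isPrefixOf])]
        simp only [List.length_cons, List.length_nil, List.drop_succ_cons, List.drop_zero]
        rw [ih rest [] _ (by simpa using Nat.lt_of_succ_lt_succ h)]
        simp only [splitNl, List.reverse_nil, List.nil_append]
        cases hsp : splitNl rest <;> simp
      · rw [if_neg (by simp [List.isPrefixOf, Ne.symm hc])]
        rw [ih rest (c :: cur) acc (by simpa using Nat.lt_of_succ_lt_succ h)]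
        simp only [splitNl, if_neg hc]
        rcases hsp : splitNl rest with _ | ⟨p, ps⟩
        · exact absurd hsp (splitNl_ne_nil rest)
        · simp

theorem splitOn_nl (s : List Char) : PySem.Chars.splitOn s ['\n'] = splitNl s := by
  unfold PySem.Chars.splitOn
  rw [splitOn_go_nl (s.length + 1) s [] [] (by omega)]
  rcases hsp : splitNl s with _ | ⟨p, ps⟩
  · exact absurd hsp (splitNl_ne_nil s)
  · simp

-- the exploded comma-filtered line
def gvLine (l : List Char) : List String := (l.filter (fun c => c != ',')).map String.singleton

-- A's outer loop: append each exploded comma-filtered line when it is non-empty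
theorem outer_loop (lines : List (List Char)) (acc : List (List String)) :
    (lines.map String.ofList).foldl
      (fun result line =>
        let temp := line.toList.foldl
          (fun temp index => if (index != ',') = true then temp ++ [String.singleton index] else temp) []
        if temp.length > 0 then result ++ [temp] else result)
      acc
    = acc ++ (lines.map gvLine).filter (fun t => t ≠ []) := by
  induction lines generalizing acc with
  | nil => simp
  | cons l rest ih =>
    simp only [List.map_cons, List.foldl_cons]
    rw [show (String.ofList l).toList.foldl
        (fun temp index => if (index != ',') = true then temp ++ [String.singleton index] else temp) []
        = [] ++ ((String.ofList l).toList.filter (fun c => c != ',')).map String.singleton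
      from PySem.List.foldl_append_if _ _ _ []]
    simp only [String.toList_ofList, List.nil_append]
    rw [ih]
    by_cases hne : (l.filter (fun c => c != ',')).map String.singleton = []
    · simp [gvLine, hne]
    · have hl : 0 < ((l.filter (fun c => c != ',')).map String.singleton).length :=
        List.length_pos_iff.mpr hne
      rw [if_pos hl]
      simp [gvLine, hne]

theorem get_votes_eq (s : String) :
    get_votes s = ((splitNl s.toList).map gvLine).filter (fun t => t ≠ []) := by
  unfold get_votes
  rw [splitOn_nl]
  simpa using outer_loop (splitNl s.toList) []

-- B's single pass with state (res, cur) flushed at the end equals spliting afterwards,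
-- with cur prefixed onto the first (current) line.
theorem alt_loop (l : List Char) (res : List (List String)) (cur : List String) :
    (let st := l.foldl gvStep (res, cur);
     if st.2 ≠ [] then st.1 ++ [st.2] else st.1)
    = res ++ (((splitNl l).map gvLine).modifyHead (fun m => cur ++ m)).filter (fun t => t ≠ []) := by
  induction l generalizing res cur with
  | nil =>
    simp only [List.foldl_nil, splitNl, List.map_cons, List.map_nil, List.modifyHead]
    by_cases h : cur = [] <;> simp [h, gvLine]
  | cons c t ih =>
    simp only [List.foldl_cons]
    by_cases hn : c = '\n'
    · subst hn
      by_cases h : cur = []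
      · subst h
        rw [show gvStep (res, []) '\n' = (res, []) from by simp [gvStep]]
        rw [ih]
        rcases hsp : splitNl t with _ | ⟨p, ps⟩
        · exact absurd hsp (splitNl_ne_nil t)
        · simp [splitNl, hsp, gvLine]
      · rw [show gvStep (res, cur) '\n' = (res ++ [cur], []) from by simp [gvStep, h]]
        rw [ih]
        rcases hsp : splitNl t with _ | ⟨p, ps⟩
        · exact absurd hsp (splitNl_ne_nil t)
        · simp [splitNl, hsp, gvLine, h]
    · by_cases hc : c = ','
      · subst hc
        rw [show gvStep (res, cur) ',' = (res, cur) from by simp [gvStep]]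
        rw [ih]
        rcases hsp : splitNl t with _ | ⟨p, ps⟩
        · exact absurd hsp (splitNl_ne_nil t)
        · simp [splitNl, hsp, gvLine, List.filter_cons]
      · rw [show gvStep (res, cur) c = (res, cur ++ [String.singleton c]) from by
          simp [gvStep, hn, hc]]
        rw [ih]
        rcases hsp : splitNl t with _ | ⟨p, ps⟩
        · exact absurd hsp (splitNl_ne_nil t)
        · simp [splitNl, hsp, hn, gvLine, hc]

theorem get_votes_alt_eq (s : String) :
    get_votes_alt s = ((splitNl s.toList).map gvLine).filter (fun t => t ≠ []) := by
  unfold get_votes_alt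
  rw [alt_loop s.toList [] []]
  rcases hsp : splitNl s.toList with _ | ⟨p, ps⟩
  · exact absurd hsp (splitNl_ne_nil _)
  · simp

-- ===== VERDICT (by name: the statement is the Claim_ definition above) =====
theorem get_votes_spec : Claim_equal_get_votes := by
  intro s _
  unfold Spec_get_votes
  rw [get_votes_eq, get_votes_alt_eq]
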